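-- pv_equiv track=rewrite | github.com/GesusMist/Isochoric-Deformation-Fields | src/eval_dycheck_iphone.py | split_consecutive_runs
-- ===== SOURCE A (Python) =====
-- from typing import Any, Dict, List, Sequence, Tuple
--
-- def split_consecutive_runs(sorted_values: Sequence[int]) -> List[List[int]]:
--     if len(sorted_values) == 0:
--         return []
--     runs = [[int(sorted_values[0])]]
--     for value in sorted_values[1:]:
--         value = int(value)
--         if value == runs[-1][-1] + 1:
--             runs[-1].append(value)
--         else:
--             runs.append([value])
--     return runs
-- ===== SOURCE B (Python) =====
-- from itertools import groupby
--
-- def split_consecutive_runs(sorted_values):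
--     return [
--         [v for _, v in g]
--         for _, g in groupby(enumerate(int(v) for v in sorted_values),
--                             key=lambda iv: iv[1] - iv[0])
--     ]
-- ===== Notes on version B (the rewrite author's own statement) =====
-- stated objective: idiomatic
-- what changed: Replaces the explicit loop that mutates the last run with itertools.groupby over enumerate, using the value-minus-index key that is constant exactly on consecutive runs.
import Mathlib
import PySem

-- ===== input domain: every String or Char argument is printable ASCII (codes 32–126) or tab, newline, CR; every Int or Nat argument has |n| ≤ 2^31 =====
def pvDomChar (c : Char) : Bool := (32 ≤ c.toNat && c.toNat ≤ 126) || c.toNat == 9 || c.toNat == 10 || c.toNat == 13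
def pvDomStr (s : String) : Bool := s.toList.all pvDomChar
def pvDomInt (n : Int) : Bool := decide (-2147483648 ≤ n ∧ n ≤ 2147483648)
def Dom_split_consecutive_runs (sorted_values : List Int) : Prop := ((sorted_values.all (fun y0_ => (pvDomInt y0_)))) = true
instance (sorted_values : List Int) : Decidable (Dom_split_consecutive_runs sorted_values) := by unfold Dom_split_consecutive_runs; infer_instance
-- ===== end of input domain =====

-- B replaces A's loop that mutates the last run with a groupby over enumerate
-- keyed by value - index (idiomatic rewrite; same complexity).


-- ===== PORT A =====
-- one loop step of A: runs[-1][-1] lookup, append to last run or start a new one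
def pvAStep (runs : List (List Int)) (value : Int) : List (List Int) :=
  if value = (runs.getLastD []).getLastD 0 + 1 then
    runs.dropLast ++ [(runs.getLastD []) ++ [value]]
  else
    runs ++ [[value]]

def split_consecutive_runs (sorted_values : List Int) : List (List Int) :=
  match sorted_values with
  | [] => []
  | x :: rest => rest.foldl pvAStep [[x]]

-- ===== PORT B =====
-- itertools.groupby over (index, value) pairs with key value - index:
-- each group is the maximal adjacent block with equal key
def pvGroupBy (pairs : List (Int × Int)) : List (List Int) :=
  match pairs with
  | [] => []
  | p :: rest =>
      (p.2 :: (rest.takeWhile (fun q => q.2 - q.1 == p.2 - p.1)).map (·.2))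
        :: pvGroupBy (rest.dropWhile (fun q => q.2 - q.1 == p.2 - p.1))
  termination_by pairs.length
  decreasing_by
    simp only [List.length_cons]
    exact Nat.lt_succ_of_le (List.length_dropWhile_le _ _)

def split_consecutive_runs_alt (sorted_values : List Int) : List (List Int) :=
  pvGroupBy (PySem.List.enumerate sorted_values 0)

-- ===== PRECONDITION & SPEC =====
def Spec_split_consecutive_runs (sorted_values : List Int) (out : List (List Int)) : Prop := out = split_consecutive_runs_alt sorted_values
instance (sorted_values : List Int) (out : List (List Int)) : Decidable (Spec_split_consecutive_runs sorted_values out) := by unfold Spec_split_consecutive_runs; infer_instance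

-- ===== CLAIM (what is proved, stated in full; the proofs are below) =====
def Claim_equal_split_consecutive_runs : Prop := ∀ (sorted_values : List Int), Dom_split_consecutive_runs sorted_values → Spec_split_consecutive_runs sorted_values (split_consecutive_runs sorted_values)

-- ===== LEMMAS AND PROOFS =====

-- the maximal consecutive continuation of x: (run-tail, remainder)
def pvCont (x : Int) (xs : List Int) : List Int × List Int :=
  match xs with
  | [] => ([], [])
  | v :: rest =>
      if v = x + 1 then
        let p := pvCont v rest
        (v :: p.1, p.2)
      else
        ([], v :: rest)

theorem pvCont_snd_length_le (x : Int) (xs : List Int) : (pvCont x xs).2.length ≤ xs.length := by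
  induction xs generalizing x with
  | nil => simp [pvCont]
  | cons v rest ih =>
      simp only [pvCont]
      split
      · exact Nat.le_succ_of_le (ih v)
      · simp

-- canonical recursive splitter, the common reference point
def pvCanon (xs : List Int) : List (List Int) :=
  match xs with
  | [] => []
  | x :: rest => (x :: (pvCont x rest).1) :: pvCanon (pvCont x rest).2
  termination_by xs.length
  decreasing_by
    simp only [List.length_cons]
    exact Nat.lt_succ_of_le (pvCont_snd_length_le _ _)

-- A-side invariant: the fold with a nonempty last run whose last element is x
theorem pvA_fold (xs : List Int) : ∀ (rs : List (List Int)) (r : List Int) (x : Int),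
    List.foldl pvAStep (rs ++ [r ++ [x]]) xs
      = rs ++ (r ++ [x] ++ (pvCont x xs).1) :: pvCanon (pvCont x xs).2 := by
  induction xs with
  | nil => intro rs r x; simp [pvCont, pvCanon]
  | cons v rest ih =>
      intro rs r x
      simp only [List.foldl_cons, pvAStep, List.getLastD_concat, List.dropLast_concat, pvCont]
      by_cases h : v = x + 1
      · rw [if_pos h, ih rs (r ++ [x]) v]
        simp [h]
      · rw [if_neg h]
        have h0 : ((rs ++ [r ++ [x]]) ++ [[v]]) = (rs ++ [r ++ [x]]) ++ [([] : List Int) ++ [v]] := by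
          simp
        rw [h0, ih (rs ++ [r ++ [x]]) [] v]
        simp [h, pvCanon]

theorem pvA_eq_canon (xs : List Int) : split_consecutive_runs xs = pvCanon xs := by
  cases xs with
  | nil => simp [split_consecutive_runs, pvCanon]
  | cons x rest =>
      have := pvA_fold rest [] [] x
      simpa [split_consecutive_runs, pvCanon] using this

-- B-side: takeWhile/dropWhile on the enumeration realise pvCont
theorem pvB_span (xs : List Int) : ∀ (i x : Int),
    ((PySem.List.enumerate xs (i+1)).takeWhile (fun q => q.2 - q.1 == x - i)).map (·.2)
        = (pvCont x xs).1
    ∧ (PySem.List.enumerate xs (i+1)).dropWhile (fun q => q.2 - q.1 == x - i)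
        = PySem.List.enumerate (pvCont x xs).2 (i + 1 + ((pvCont x xs).1.length : Int)) := by
  induction xs with
  | nil => intro i x; simp [pvCont, PySem.List.enumerate]
  | cons v rest ih =>
      intro i x
      rw [PySem.List.enumerate_cons]
      by_cases h : v = x + 1
      · have hxy : x - i = v - (i + 1) := by omega
        simp only [List.takeWhile_cons, List.dropWhile_cons, pvCont, if_pos h, hxy,
          beq_self_eq_true, if_true, List.map_cons, List.length_cons]
        obtain ⟨h1, h2⟩ := ih (i + 1) v
        refine ⟨by rw [h1], ?_⟩
        rw [h2]
        congr 1
        push_cast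
        ring
      · have hk : ((v - (i + 1) == x - i) = false) := by simp; omega
        simp only [List.takeWhile_cons, List.dropWhile_cons, hk, pvCont, if_neg h]
        refine ⟨rfl, ?_⟩
        norm_num [PySem.List.enumerate_cons]

theorem pvB_eq_canon (xs : List Int) : ∀ (i : Int),
    pvGroupBy (PySem.List.enumerate xs i) = pvCanon xs := by
  induction hn : xs.length using Nat.strong_induction_on generalizing xs with
  | _ n ih =>
    cases xs with
    | nil => intro i; simp [PySem.List.enumerate, pvGroupBy, pvCanon]
    | cons x rest =>
      intro i
      rw [PySem.List.enumerate_cons, pvGroupBy, pvCanon]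
      obtain ⟨h1, h2⟩ := pvB_span rest i x
      simp only at h1 h2 ⊢
      rw [h1, h2]
      have hlt : (pvCont x rest).2.length < n := by
        subst hn
        exact Nat.lt_succ_of_le (pvCont_snd_length_le x rest)
      rw [ih _ hlt _ rfl]

-- ===== VERDICT (by name: the statement is the Claim_ definition above) =====
theorem split_consecutive_runs_spec : Claim_equal_split_consecutive_runs := by
  intro xs _
  unfold Spec_split_consecutive_runs split_consecutive_runs_alt
  rw [pvA_eq_canon, pvB_eq_canon]
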